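-- pv_equiv track=rewrite | github.com/SuiG3neris/dao-governance-scraper | src/utils/extraction_utils.py | _extract_table_region
-- ===== SOURCE A (Python) =====
-- from typing import Dict, List, Optional, Union, Any
--
-- def _extract_table_region(text: str, start_pos: int) -> Optional[str]:
--     """Extract complete table region from text."""
--     lines = text[start_pos:].split('\n')
--     table_lines = []
--
--     for line in lines:
--         if not line.strip():
--             if table_lines:
--                 break
--         else:
--             table_lines.append(line)
--
--     return '\n'.join(table_lines) if table_lines else None
-- ===== SOURCE B (Python) =====
-- def _extract_table_region(text, start_pos):
--     """Extract complete table region from text."""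
--     lines = text[start_pos:].split('\n')
--     n = len(lines)
--     i = next((k for k in range(n) if lines[k].strip()), None)
--     if i is None:
--         return None
--     j = next((k for k in range(i + 1, n) if not lines[k].strip()), n)
--     return '\n'.join(lines[i:j])
-- ===== Notes on version B (the rewrite author's own statement) =====
-- stated objective: alternative
-- what changed: Replaced A's flag-driven accumulate-and-break streaming loop with boundary-index arithmetic: find the index of the first non-blank line and the first blank index after it, then return a single slice lines[i:j].
import Mathlib
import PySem

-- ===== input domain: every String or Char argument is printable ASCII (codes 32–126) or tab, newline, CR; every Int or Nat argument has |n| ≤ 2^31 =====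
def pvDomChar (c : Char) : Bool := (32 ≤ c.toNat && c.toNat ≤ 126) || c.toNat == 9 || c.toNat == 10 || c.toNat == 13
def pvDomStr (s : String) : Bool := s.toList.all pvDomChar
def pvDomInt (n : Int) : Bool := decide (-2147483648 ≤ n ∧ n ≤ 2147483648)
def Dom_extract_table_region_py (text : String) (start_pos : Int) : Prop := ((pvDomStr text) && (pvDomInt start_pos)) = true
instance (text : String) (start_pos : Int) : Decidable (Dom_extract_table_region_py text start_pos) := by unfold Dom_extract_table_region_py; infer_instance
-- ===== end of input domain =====

-- B replaces A's flag-driven accumulate-and-break streaming loop by boundary-index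
-- arithmetic: find the index of the first non-blank line and of the first blank line
-- after it, then return a single slice lines[i:j] (objective: alternative; same cost).

-- ===== PORT A =====
-- the for-loop of A with its break: acc is table_lines
def pvLoopA : List String → List String → List String
  | [], acc => acc
  | l :: rest, acc =>
    if PySem.Str.strip l = "" then
      (if acc ≠ [] then acc else pvLoopA rest acc)
    else pvLoopA rest (acc ++ [l])

def extract_table_region_py (text : String) (start_pos : Int) : Option String :=
  let lines := (PySem.Str.split? (PySem.Str.slice text (some start_pos) none) "\n").getD []  -- sep "\n" ≠ "": split? is always some
  let table_lines := pvLoopA lines []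
  if table_lines ≠ [] then some (PySem.Str.join "\n" table_lines) else none

-- ===== PORT B =====
-- Source B: i = first index with lines[i].strip() (None → return None);
--       j = first index > i with blank line (default n); return '\n'.join(lines[i:j]).
-- The next(... for k in range ...) searches are ported as List.findIdx? (the j-search,
-- over range(i+1,n), is findIdx? on lines.drop (i+1) offset by i+1);
-- the slice lines[i:j] with 0 ≤ i ≤ j is (lines.drop i).take (j - i).
def pvBodyB (lines : List String) : Option (List String) :=
  match lines.findIdx? (fun l => !(PySem.Str.strip l == "")) with
  | none => none
  | some i =>
    let j := match (lines.drop (i+1)).findIdx? (fun l => PySem.Str.strip l == "") with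
             | some k => i + 1 + k
             | none => lines.length
    some ((lines.drop i).take (j - i))

def extract_table_region_py_alt (text : String) (start_pos : Int) : Option String :=
  let lines := (PySem.Str.split? (PySem.Str.slice text (some start_pos) none) "\n").getD []  -- sep "\n" ≠ "": split? is always some
  match pvBodyB lines with
  | none => none
  | some body => some (PySem.Str.join "\n" body)

-- ===== PRECONDITION & SPEC =====
def Spec_extract_table_region_py (text : String) (start_pos : Int) (out : Option String) : Prop := out = extract_table_region_py_alt text start_pos
instance (text : String) (start_pos : Int) (out : Option String) : Decidable (Spec_extract_table_region_py text start_pos out) := by unfold Spec_extract_table_region_py; infer_instance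

-- ===== CLAIM (what is proved, stated in full; the proofs are below) =====
def Claim_equal_extract_table_region_py : Prop := ∀ (text : String) (start_pos : Int), Dom_extract_table_region_py text start_pos → Spec_extract_table_region_py text start_pos (extract_table_region_py text start_pos)

-- ===== LEMMAS AND PROOFS =====

-- A's loop once the accumulator is non-empty only ever takes the non-blank prefix
lemma pvLoopA_ne (lines acc : List String) (h : acc ≠ []) :
    pvLoopA lines acc = acc ++ lines.takeWhile (fun l => !(PySem.Str.strip l == "")) := by
  induction lines generalizing acc with
  | nil => simp [pvLoopA]
  | cons l rest ih =>
    by_cases hb : PySem.Str.strip l = ""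
    · simp [pvLoopA, hb, h]
    · have : (PySem.Str.strip l == "") = false := by simp [hb]
      simp [pvLoopA, hb, this, ih (acc ++ [l]) (by simp)]

-- A's result = drop the blank prefix, take the non-blank run
lemma pvLoopA_nil (lines : List String) :
    pvLoopA lines [] =
      (lines.dropWhile (fun l => PySem.Str.strip l == "")).takeWhile
        (fun l => !(PySem.Str.strip l == "")) := by
  induction lines with
  | nil => simp [pvLoopA]
  | cons l rest ih =>
    by_cases hb : PySem.Str.strip l = ""
    · simp [pvLoopA, hb, ih]
    · have hbf : (PySem.Str.strip l == "") = false := by simp [hb]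
      simp [pvLoopA, hb, hbf, pvLoopA_ne rest [l] (by simp)]


-- takeWhile (¬blank) is the take up to the first blank index
lemma tw_findIdx (M : List String) :
    M.takeWhile (fun l => !(PySem.Str.strip l == "")) =
      (match M.findIdx? (fun l => PySem.Str.strip l == "") with
       | some k => M.take k
       | none => M) := by
  induction M with
  | nil => simp
  | cons m ms ih =>
    cases hb : (PySem.Str.strip m == "") with
    | true => simp [List.findIdx?_cons, hb]
    | false =>
      cases h : ms.findIdx? (fun l => PySem.Str.strip l == "") with
      | none => simp [List.findIdx?_cons, hb, ih, h]
      | some k => simp [List.findIdx?_cons, hb, ih, h]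

-- a blank head line only shifts all of B's indices by one
lemma pvBodyB_blank (l : String) (rest : List String)
    (hb : (PySem.Str.strip l == "") = true) :
    pvBodyB (l :: rest) = pvBodyB rest := by
  unfold pvBodyB
  simp only [List.findIdx?_cons, hb, Bool.not_true, Bool.false_eq_true, if_false]
  cases h : rest.findIdx? (fun l => !(PySem.Str.strip l == "")) with
  | none => simp
  | some i =>
    simp only [Option.map_some, List.drop_succ_cons, List.length_cons]
    cases h2 : (rest.drop (i+1)).findIdx? (fun l => PySem.Str.strip l == "") with
    | none =>
      have e : rest.length + 1 - (i + 1) = rest.length - i := by omega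
      rw [e]
    | some k =>
      have e : i + 1 + 1 + k - (i + 1) = i + 1 + k - i := by omega
      rw [e]

-- a non-blank head: i = 0 and the slice is the head plus the non-blank run of the tail
lemma pvBodyB_nonblank (l : String) (rest : List String)
    (hb : (PySem.Str.strip l == "") = false) :
    pvBodyB (l :: rest) = some (l :: rest.takeWhile (fun l => !(PySem.Str.strip l == ""))) := by
  unfold pvBodyB
  simp only [List.findIdx?_cons, hb, Bool.not_false, if_true, List.drop_succ_cons,
    List.drop_zero, List.length_cons, Nat.sub_zero]
  cases h2 : rest.findIdx? (fun l => PySem.Str.strip l == "") with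
  | none => simp [tw_findIdx, h2]
  | some k =>
    simp only [tw_findIdx, h2]
    have e : 1 + k = k + 1 := by omega
    rw [e, List.take_succ_cons]

-- B's index/slice computation equals the drop-blank / take-non-blank formulation
lemma pvBodyB_eq (L : List String) :
    pvBodyB L =
      (match (L.dropWhile (fun l => PySem.Str.strip l == "")).takeWhile
          (fun l => !(PySem.Str.strip l == "")) with
       | [] => none
       | t => some t) := by
  induction L with
  | nil => simp [pvBodyB]
  | cons l rest ih =>
    cases hb : (PySem.Str.strip l == "") with
    | true => rw [pvBodyB_blank l rest hb, ih]; simp [hb]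
    | false => simp [pvBodyB_nonblank l rest hb, hb]

-- ===== VERDICT (by name: the statement is the Claim_ definition above) =====
theorem extract_table_region_py_spec : Claim_equal_extract_table_region_py := by
  intro text start_pos _
  unfold Spec_extract_table_region_py extract_table_region_py extract_table_region_py_alt
  simp only [pvLoopA_nil, pvBodyB_eq]
  generalize (((PySem.Str.split? (PySem.Str.slice text (some start_pos) none) "\n").getD []).dropWhile
      (fun l => PySem.Str.strip l == "")).takeWhile (fun l => !(PySem.Str.strip l == "")) = body
  rcases body with _ | ⟨b, bs⟩ <;> simp
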